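-- pv_equiv track=rewrite | github.com/achak98/ML-and-AI | sudokusolver.py | solv
-- ===== SOURCE A (Python) =====
-- def isEmpty(a, emptySpaces):
-- 	for row in range(3):
-- 		for col in range(3):
-- 			if(a[row][col] == 0):
-- 				emptySpaces[0] = row
-- 				emptySpaces[1] = col
-- 				return True
-- 	return False
--
-- def uRow(a, row, num):
-- 	for i in range(3):
-- 		if(a[row][i] == num):
-- 			return True
-- 	return False
--
-- def uCol(a, col, num):
-- 	for i in range(3):
-- 		if(a[i][col] == num):
-- 			return True
-- 	return False
--
-- def isSafe(a, row, col, num):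
--
-- 	return not uRow(a, row, num) and not uCol(a, col, num)
--
-- def solv(a):
--
-- 	emptySpaces = [0, 0]
--
-- 	if(not isEmpty(a, emptySpaces)):
-- 		return True
--
-- 	row = emptySpaces[0]
-- 	col = emptySpaces[1]
--
-- 	for num in range(1, 4):
--
-- 		if(isSafe(a, row, col, num)):
--
-- 			a[row][col] = num
--
-- 			if(solv(a)):
-- 				return True
--
-- 			a[row][col] = 0
-- 	return False
-- ===== SOURCE B (Python) =====
-- def solv(a):
--     # Cursor-based backtracking: a single row-major scan driven by a cell
--     # index 0..8 instead of restarting the empty-cell search on every call.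
--     # Mutates `a` like the original (fills the first solution, restores on failure).
--     def go(k):
--         if k == 9:
--             return True
--         r, c = divmod(k, 3)
--         if a[r][c] != 0:
--             return go(k + 1)
--         for v in (1, 2, 3):
--             if all(a[r][j] != v for j in range(3)) and all(a[i][c] != v for i in range(3)):
--                 a[r][c] = v
--                 if go(k + 1):
--                     return True
--                 a[r][c] = 0
--         return False
--     return go(0)
-- ===== Notes on version B (the rewrite author's own statement) =====
-- stated objective: alternative
-- what changed: A restarts a full row-major scan for the first empty cell (isEmpty) at every recursive call and probes rows/columns with linear searches that return on first hit; B is a cursor-based backtracker: the recursion carries the row-major cell index, skips filled cells once, and never rescans the grid from (0,0).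
-- outside the precondition, e.g. on solv([[0, 2, 3], [1]]): A returns False, B returns False
import Mathlib
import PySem

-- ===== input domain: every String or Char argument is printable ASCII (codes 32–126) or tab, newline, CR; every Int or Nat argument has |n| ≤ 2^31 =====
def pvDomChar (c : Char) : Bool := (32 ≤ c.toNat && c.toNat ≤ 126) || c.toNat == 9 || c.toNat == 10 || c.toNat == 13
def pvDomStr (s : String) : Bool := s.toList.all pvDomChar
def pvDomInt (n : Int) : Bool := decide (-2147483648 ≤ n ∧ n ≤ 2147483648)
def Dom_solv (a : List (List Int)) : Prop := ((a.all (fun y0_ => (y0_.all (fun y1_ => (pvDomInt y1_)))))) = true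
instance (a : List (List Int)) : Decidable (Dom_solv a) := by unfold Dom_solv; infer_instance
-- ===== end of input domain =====

-- B replaces A's restart-from-(0,0) empty-cell search by a cursor-based scan: the
-- backtracking recursion carries the row-major cell index and never rescans the grid.
-- Both A and B mutate `a` in place identically (first solution filled in on success,
-- grid restored on failure); the equivalence proved here is about the return value.

-- shared primitives for Python's a[r][c] read / write (in range under Pre_solv)
def pvCell (g : List (List Int)) (r c : Nat) : Int := (g.getD r []).getD c 0
def pvSet (g : List (List Int)) (r c : Nat) (v : Int) : List (List Int) :=
  g.set r ((g.getD r []).set c v)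

-- ===== PORT A =====
def uRow (g : List (List Int)) (row : Nat) (num : Int) : Bool :=
  (List.range 3).any fun i => pvCell g row i == num

def uCol (g : List (List Int)) (col : Nat) (num : Int) : Bool :=
  (List.range 3).any fun i => pvCell g i col == num

def isSafe (g : List (List Int)) (row col : Nat) (num : Int) : Bool :=
  !uRow g row num && !uCol g col num

-- the row-major (row, col) pairs scanned by isEmpty's nested loops
def pvPairs : List (Nat × Nat) :=
  (List.range 3).flatMap fun r => (List.range 3).map fun c => (r, c)

-- isEmpty: first (row, col) with a zero, none if the 3×3 window is full
def isEmptyA (g : List (List Int)) : Option (Nat × Nat) :=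
  pvPairs.find? fun p => pvCell g p.1 p.2 == 0

-- fuel = recursion depth; each recursive call fills one of the ≤ 9 window cells,
-- so 10 levels always suffice under Pre_solv (proved in solvF_fuel_goB below)
def solvF : Nat → List (List Int) → Bool
  | 0, _ => false
  | f + 1, g =>
    match isEmptyA g with
    | none => true
    | some (r, c) =>
      ([1, 2, 3] : List Int).any fun num =>
        isSafe g r c num && solvF f (pvSet g r c num)

def solv (a : List (List Int)) : Bool := solvF 10 a

-- ===== PORT B =====
def safeB (g : List (List Int)) (r c : Nat) (v : Int) : Bool :=
  ((List.range 3).all fun j => pvCell g r j != v) &&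
  ((List.range 3).all fun i => pvCell g i c != v)

-- go k in Source B, written as structural recursion on n = 9 - k (the cells left to scan)
def goB (g : List (List Int)) : Nat → Bool
  | 0 => true
  | n + 1 =>
    let k := 9 - (n + 1)
    let r := k / 3
    let c := k % 3
    if pvCell g r c != 0 then goB g n
    else
      ([1, 2, 3] : List Int).any fun v =>
        safeB g r c v && goB (pvSet g r c v) n

def solv_alt (a : List (List Int)) : Bool := goB a 9

-- ===== PRECONDITION & SPEC =====
-- Pre_solv excludes grids whose first three rows or their first three columns are missing
-- (fewer than 3 rows, or one of rows 0..2 shorter than 3): there A raises IndexError on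
-- almost all inputs, and on the rare ones where it still returns, the value is an accident
-- of the short-circuit order of its row/column scans (B's scans short-circuit differently).
def Pre_solv (a : List (List Int)) : Prop :=
  3 ≤ a.length ∧ 3 ≤ (a.getD 0 []).length ∧ 3 ≤ (a.getD 1 []).length ∧ 3 ≤ (a.getD 2 []).length
instance (a : List (List Int)) : Decidable (Pre_solv a) := by unfold Pre_solv; infer_instance

def pvWitness_solv : List (List Int) := [[1, 0, 3], [0, 3, 1], [3, 1, 2]]

def Spec_solv (a : List (List Int)) (out : Bool) : Prop := out = solv_alt a
instance (a : List (List Int)) (out : Bool) : Decidable (Spec_solv a out) := by unfold Spec_solv; infer_instance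

-- ===== CLAIM (what is proved, stated in full; the proofs are below) =====
def Claim_equal_solv : Prop := ∀ (a : List (List Int)), Dom_solv a → Pre_solv a → Spec_solv a (solv a)

-- ===== LEMMAS AND PROOFS =====

theorem pv_row_len {g : List (List Int)} (hg : Pre_solv g) {r : Nat} (hr : r < 3) :
    3 ≤ (g.getD r []).length := by
  obtain ⟨h0, h1, h2, h3⟩ := hg
  interval_cases r <;> assumption

theorem pvCell_set {g : List (List Int)} (hg : Pre_solv g) {r c : Nat}
    (hr : r < 3) (hc : c < 3) (v : Int) (r' c' : Nat) :
    pvCell (pvSet g r c v) r' c' =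
      if r' = r ∧ c' = c then v else pvCell g r' c' := by
  have hrl : r < g.length := lt_of_lt_of_le hr hg.1
  have hcl : c < (g.getD r []).length := lt_of_lt_of_le hc (pv_row_len hg hr)
  unfold pvCell pvSet
  simp only [List.getD] at hcl
  by_cases h : r' = r
  · subst h
    simp only [List.getD, List.getElem?_set, if_pos hrl]
    by_cases h2 : c' = c
    · subst h2
      simp [hcl]
    · simp only [if_true, true_and, Option.getD_some, List.getElem?_set]
      rw [if_neg (fun h' => h2 h'.symm)]
      simp [h2]
  · simp only [List.getD, List.getElem?_set]
    rw [if_neg (fun h' => h h'.symm)]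
    simp [h]

theorem pvPre_set {g : List (List Int)} (hg : Pre_solv g) (r c : Nat) (v : Int) :
    Pre_solv (pvSet g r c v) := by
  have hlen : ∀ i : Nat, ((pvSet g r c v).getD i []).length = (g.getD i []).length := by
    intro i
    unfold pvSet
    by_cases h : r = i
    · subst h
      by_cases hrl : r < g.length
      · simp [List.getD, hrl]
      · simp [List.getD, hrl]
    · simp [List.getD, h]
  obtain ⟨h0, h1, h2, h3⟩ := hg
  unfold Pre_solv
  simp only [List.getD] at hlen h1 h2 h3 ⊢
  exact ⟨by simpa [pvSet] using h0, by rw [hlen 0]; exact h1, by rw [hlen 1]; exact h2,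
    by rw [hlen 2]; exact h3⟩

theorem pvPairs_getElem? (j : Nat) (hj : j < 9) : pvPairs[j]? = some (j / 3, j % 3) := by
  interval_cases j <;> rfl

theorem pvPairs_mem (q : Nat) (hq : q < 9) : (q / 3, q % 3) ∈ pvPairs := by
  have := pvPairs_getElem? q hq
  exact List.mem_of_getElem? this

-- skipping nonzero cells: goB walks from position k to position p without change
theorem goB_skip (g : List (List Int)) :
    ∀ (d k : Nat), k + d ≤ 9 →
      (∀ q, k ≤ q → q < k + d → pvCell g (q / 3) (q % 3) ≠ 0) →
      goB g (9 - k) = goB g (9 - (k + d)) := by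
  intro d
  induction d with
  | zero => intro k _ _; rfl
  | succ d ih =>
    intro k hk hnz
    have hk8 : k ≤ 8 := by omega
    have h9 : 9 - k = (8 - k) + 1 := by omega
    rw [h9]
    have hkk : 9 - (8 - k + 1) = k := by omega
    have hnzk : pvCell g (k / 3) (k % 3) ≠ 0 := hnz k le_rfl (by omega)
    have : goB g ((8 - k) + 1) = goB g (8 - k) := by
      simp only [goB, hkk]
      simp [bne, hnzk]
    rw [this, show 8 - k = 9 - (k + 1) by omega]
    rw [ih (k + 1) (by omega) (fun q hq1 hq2 => hnz q (by omega) (by omega))]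
    congr 1
    omega

theorem safe_eq (g : List (List Int)) (r c : Nat) (v : Int) :
    isSafe g r c v = safeB g r c v := by
  simp only [isSafe, safeB, uRow, uCol, List.range_succ, List.range_zero,
    List.nil_append, List.any_append, List.any_cons, List.any_nil, List.all_append,
    List.all_cons, List.all_nil, Bool.not_or, bne]
  simp [Bool.and_assoc]

-- main invariant: with all window cells before position k nonzero and enough fuel,
-- A's restart-scan search equals B's cursor scan from position k
theorem solvF_fuel_goB :
    ∀ (f : Nat) (g : List (List Int)) (k : Nat), Pre_solv g → k ≤ 9 →
      (∀ q, q < k → pvCell g (q / 3) (q % 3) ≠ 0) →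
      9 - k < f → solvF f g = goB g (9 - k) := by
  intro f
  induction f with
  | zero => intro g k _ _ _ h; omega
  | succ f ih =>
    intro g k hg hk9 hpfx hfuel
    match hfind : isEmptyA g with
    | none =>
      have hall : ∀ q, q < 9 → pvCell g (q / 3) (q % 3) ≠ 0 := by
        intro q hq
        have := (List.find?_eq_none.mp hfind) _ (pvPairs_mem q hq)
        simpa using this
      have := goB_skip g (9 - k) k (by omega)
        (fun q h1 h2 => hall q (by omega))
      rw [show k + (9 - k) = 9 by omega] at this
      simp only [solvF, hfind]
      rw [this]
      rfl
    | some rc =>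
      obtain ⟨r, c⟩ := rc
      -- characterise the first empty cell
      obtain ⟨hp, i, hi, hgeti, hmin⟩ := List.find?_eq_some_iff_getElem.mp hfind
      have hlen : pvPairs.length = 9 := by rfl
      have hi9 : i < 9 := by omega
      have hri : (r, c) = ((i / 3 : Nat), (i % 3 : Nat)) := by
        have h1 : pvPairs[i]? = some (r, c) := by rw [List.getElem?_eq_getElem hi, hgeti]
        rw [pvPairs_getElem? i hi9] at h1
        exact (Option.some.inj h1).symm
      have hr : r = i / 3 := congrArg Prod.fst hri
      have hc : c = i % 3 := congrArg Prod.snd hri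
      have hzero : pvCell g r c = 0 := by simpa using hp
      have hr3 : r < 3 := by omega
      have hc3 : c < 3 := by omega
      have hbefore : ∀ j, j < i → pvCell g (j / 3) (j % 3) ≠ 0 := by
        intro j hj
        have h2 := hmin j hj
        have hj9 : j < 9 := by omega
        have hjlen : j < pvPairs.length := by omega
        have hjp : pvPairs[j] = ((j / 3 : Nat), (j % 3 : Nat)) := by
          have h1 := pvPairs_getElem? j hj9
          rw [List.getElem?_eq_getElem hjlen] at h1
          exact Option.some.inj h1
        simp only [hjp] at h2
        simpa using h2
      have hki : k ≤ i := by
        by_contra hlt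
        exact hpfx i (by omega) (by rw [hr, hc] at hzero; exact hzero)
      -- B: skip from k to i
      have hskip := goB_skip g (i - k) k (by omega)
        (fun q h1 h2 => hbefore q (by omega))
      rw [show k + (i - k) = i by omega] at hskip
      -- unfold goB at position i
      have h9i : 9 - i = (8 - i) + 1 := by omega
      have hii : 9 - (8 - i + 1) = i := by omega
      -- the per-candidate agreement
      have hcand : ∀ v : Int, v ≠ 0 →
          (isSafe g r c v && solvF f (pvSet g r c v)) =
          (safeB g r c v && goB (pvSet g r c v) (8 - i)) := by
        intro v hv
        rw [safe_eq]
        congr 1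
        have hg' : Pre_solv (pvSet g r c v) := pvPre_set hg r c v
        have hpfx' : ∀ q, q < i + 1 → pvCell (pvSet g r c v) (q / 3) (q % 3) ≠ 0 := by
          intro q hq
          rw [pvCell_set hg hr3 hc3]
          by_cases hqi : q = i
          · subst hqi
            rw [if_pos ⟨hr.symm, hc.symm⟩]
            exact hv
          · rw [if_neg (by
              rintro ⟨h1, h2⟩
              rw [hr] at h1; rw [hc] at h2
              omega)]
            exact hbefore q (by omega)
        have := ih (pvSet g r c v) (i + 1) hg' (by omega) hpfx' (by omega)
        rw [this, show 9 - (i + 1) = 8 - i by omega]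
      simp only [solvF, hfind]
      rw [hskip, h9i]
      simp only [goB, hii]
      rw [if_neg (by rw [← hr, ← hc]; simp [bne, hzero])]
      simp only [List.any_cons, List.any_nil, Bool.or_false]
      rw [hr, hc] at hcand ⊢
      rw [hcand 1 (by decide), hcand 2 (by decide), hcand 3 (by decide)]

-- ===== VERDICT (by name: the statement is the Claim_ definition above) =====
theorem solv_spec : Claim_equal_solv := by
  intro a _ hpre
  unfold Spec_solv solv solv_alt
  have := solvF_fuel_goB 10 a 0 hpre (by omega) (fun q hq => absurd hq (by omega)) (by omega)
  simpa using this
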